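-- pv_equiv track=rewrite | github.com/NikolayHudyakov/Netology | ProfessionalWorkWithPython/Tests/exercise2.py | get_lowest_course
-- ===== SOURCE A (Python) =====
-- def get_lowest_course(courses, mentors, durations):
-- 	courses_list = []
-- 	for cours, mentors, duration in zip(courses, mentors, durations):
-- 		course_dict = {
-- 			"title": cours,
-- 			"mentors": mentors,
-- 			"duration": duration
-- 		}
-- 		courses_list.append(course_dict)
-- 	minis = []
-- 	for index, duration in enumerate(durations):
-- 		if duration == min(durations):
-- 			minis.append(index)
-- 	courses_min = []
-- 	for id in minis:
-- 		courses_min.append(courses_list[id]["title"])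
-- 	return ", ".join(courses_min)
-- ===== SOURCE B (Python) =====
-- def get_lowest_course(courses, mentors, durations):
--     titles = [c for c, _, _ in zip(courses, mentors, durations)]
--     best = None
--     result = []
--     for i, d in enumerate(durations):
--         if best is None or d < best:
--             best = d
--             result = [titles[i]]
--         elif d == best:
--             result.append(titles[i])
--     return ", ".join(result)
-- ===== Notes on version B (the rewrite author's own statement) =====
-- stated objective: alternative
-- what changed: B replaces A's three passes (build a list of dicts, recompute min(durations) inside a scan to collect minimal indices, then index back into the table) by one single pass over enumerate(durations) that maintains the running minimum and resets/extends the list of titles, joining at the end.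
import Mathlib
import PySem

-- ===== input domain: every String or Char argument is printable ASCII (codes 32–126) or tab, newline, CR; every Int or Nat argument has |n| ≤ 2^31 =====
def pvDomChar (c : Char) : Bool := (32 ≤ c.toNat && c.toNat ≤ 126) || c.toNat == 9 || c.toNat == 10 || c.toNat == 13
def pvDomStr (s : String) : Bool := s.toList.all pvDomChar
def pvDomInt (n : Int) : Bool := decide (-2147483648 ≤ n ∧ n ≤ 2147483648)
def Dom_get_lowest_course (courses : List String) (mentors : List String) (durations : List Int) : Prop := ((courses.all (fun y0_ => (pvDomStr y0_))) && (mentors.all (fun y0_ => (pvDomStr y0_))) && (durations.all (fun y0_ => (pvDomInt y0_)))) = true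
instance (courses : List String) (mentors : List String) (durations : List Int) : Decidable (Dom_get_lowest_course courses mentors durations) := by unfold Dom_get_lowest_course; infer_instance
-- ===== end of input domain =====

-- B replaces A's table + min-scan + filter + index-back passes by one pass keeping the running minimum and its titles; equal return value, proved on Pre_ (where neither program raises).

-- ===== PORT A =====
-- course_dict is ported as the triple (title, mentors, duration); only the "title" field is ever read back.
-- 'courses_list[id]' may raise IndexError in Python; Pre_get_lowest_course excludes exactly those inputs, here pyGet? … .getD "".
def get_lowest_course (courses : List String) (mentors : List String) (durations : List Int) : String :=
  let courses_list := ((courses.zip mentors).zip durations).foldl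
    (fun acc t => acc ++ [(t.1.1, t.1.2, t.2)]) ([] : List (String × String × Int))
  let minis := (PySem.List.enumerate durations 0).foldl
    (fun acc p => if some p.2 = PySem.List.min? durations (fun x => x) then acc ++ [p.1] else acc)
    ([] : List Int)
  let courses_min := minis.foldl
    (fun acc id => acc ++ [((PySem.List.pyGet? courses_list id).map (fun cd => cd.1)).getD ""])
    ([] : List String)
  PySem.Str.join ", " courses_min

-- ===== PORT B =====
-- loop body of B: state = (best : Option Int, result : List String); 'titles[i]' as in Python (IndexError outside Pre_, here pyGet? … .getD "")
def pvStepB (titles : List String) (st : Option Int × List String) (p : Int × Int) : Option Int × List String :=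
  match st.1 with
  | none => (some p.2, [(PySem.List.pyGet? titles p.1).getD ""])
  | some b =>
    if p.2 < b then (some p.2, [(PySem.List.pyGet? titles p.1).getD ""])
    else if p.2 = b then (some b, st.2 ++ [(PySem.List.pyGet? titles p.1).getD ""])
    else st

def get_lowest_course_alt (courses : List String) (mentors : List String) (durations : List Int) : String :=
  let titles := ((courses.zip mentors).zip durations).map (fun t => t.1.1)
  let st := (PySem.List.enumerate durations 0).foldl (pvStepB titles) (none, [])
  PySem.Str.join ", " st.2

-- ===== PRECONDITION & SPEC =====
-- Pre_ excludes exactly the inputs where the Python A raises IndexError: some index holding the minimal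
-- duration is ≥ len(courses_list) = min(len courses, len mentors, len durations) (B raises IndexError there too).
def Pre_get_lowest_course (courses : List String) (mentors : List String) (durations : List Int) : Prop :=
  ∀ p ∈ PySem.List.enumerate durations 0,
    some p.2 = PySem.List.min? durations (fun x => x) →
      p.1 < min (courses.length : Int) (mentors.length : Int)
instance (courses : List String) (mentors : List String) (durations : List Int) : Decidable (Pre_get_lowest_course courses mentors durations) := by unfold Pre_get_lowest_course; infer_instance
def pvWitness_get_lowest_course : List String × List String × List Int := (["a", "b"], ["x", "y"], [2, 1])

def Spec_get_lowest_course (courses : List String) (mentors : List String) (durations : List Int) (out : String) : Prop := out = get_lowest_course_alt courses mentors durations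
instance (courses : List String) (mentors : List String) (durations : List Int) (out : String) : Decidable (Spec_get_lowest_course courses mentors durations out) := by unfold Spec_get_lowest_course; infer_instance

-- ===== CLAIM (what is proved, stated in full; the proofs are below) =====
def Claim_equal_get_lowest_course : Prop := ∀ (courses : List String) (mentors : List String) (durations : List Int), Dom_get_lowest_course courses mentors durations → Pre_get_lowest_course courses mentors durations → Spec_get_lowest_course courses mentors durations (get_lowest_course courses mentors durations)

-- ===== LEMMAS AND PROOFS =====

-- characterisation of B's single-pass fold: first component = minimum of the whole list (none iff empty),
-- second = the titles at the indices achieving it, in order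
lemma pvBfold (T : List String) (d : List Int) :
    (PySem.List.enumerate d 0).foldl (pvStepB T) (none, []) =
      (PySem.List.min? d (fun x => x),
       ((PySem.List.enumerate d 0).filter
          (fun p => decide (some p.2 = PySem.List.min? d (fun x => x)))).map
         (fun p => (PySem.List.pyGet? T p.1).getD "")) := by
  induction d using List.reverseRecOn with
  | nil => simp [PySem.List.enumerate_nil, PySem.List.min?]
  | append_singleton xs x ih =>
    rw [PySem.List.enumerate_append, List.foldl_append, ih]
    cases xs with
    | nil =>
      simp [PySem.List.enumerate_nil, PySem.List.enumerate_cons, pvStepB,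
        PySem.List.min?]
    | cons h t =>
      have hmin : PySem.List.min? (h :: t) (fun y => y) = some (t.foldl min h) :=
        PySem.List.min?_id_cons h t
      have hmin2 : PySem.List.min? ((h :: t) ++ [x]) (fun y => y) = some (min (t.foldl min h) x) := by
        simp [PySem.List.min?_id_cons, List.foldl_append]
      have hle : ∀ y ∈ (h :: t), t.foldl min h ≤ y := fun y hy => by
        simpa using PySem.List.min?_isMin hmin y hy
      rw [hmin, hmin2]
      rw [show PySem.List.enumerate [x] ((0:Int) + (h :: t).length) = [(((0:Int) + (h :: t).length), x)] by
        simp [PySem.List.enumerate_cons, PySem.List.enumerate_nil]]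
      rw [List.foldl_cons, List.foldl_nil, List.filter_append]
      rcases lt_trichotomy x (t.foldl min h) with hlt | heq | hgt
      · -- strictly smaller last element: the state is reset; no earlier index passes the new filter
        have hmx : min (t.foldl min h) x = x := min_eq_right hlt.le
        have hfilt : (PySem.List.enumerate (h :: t) 0).filter
            (fun p => decide (some p.2 = some (min (t.foldl min h) x))) = [] := by
          rw [List.filter_eq_nil_iff]
          intro p hp
          rcases (PySem.List.mem_enumerate_iff (h :: t) 0 p).1 hp with ⟨k, hk, rfl⟩
          have := hle _ (List.getElem_mem hk)
          simp only [hmx, decide_eq_true_eq, Option.some_inj]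
          omega
        rw [hfilt]
        simp [pvStepB, hmx, hlt]
      · subst heq
        simp [pvStepB, min_self]
      · have hmx : min (t.foldl min h) x = t.foldl min h := min_eq_left hgt.le
        have hne : ¬ (x = t.foldl min h) := by omega
        simp [pvStepB, hmx, hne, not_lt.mpr hgt.le]

-- the two ports return the same string on every input (A's pass structure folded into filter/map form)
lemma pv_ports_eq (courses mentors : List String) (durations : List Int) :
    get_lowest_course courses mentors durations = get_lowest_course_alt courses mentors durations := by
  simp only [get_lowest_course, get_lowest_course_alt]
  rw [pvBfold]
  rw [PySem.List.foldl_append_singleton_eq_map, List.nil_append]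
  rw [PySem.List.foldl_append_ite (p := fun p : Int × Int => some p.2 = PySem.List.min? durations (fun x => x)) (f := fun p : Int × Int => p.1), List.nil_append]
  rw [PySem.List.foldl_append_singleton_eq_map, List.nil_append]
  rw [List.map_map]
  congr 1
  apply List.map_congr_left
  intro p hp
  have hp' : p ∈ PySem.List.enumerate durations 0 := List.mem_of_mem_filter hp
  rcases (PySem.List.mem_enumerate_iff durations 0 p).1 hp' with ⟨k, hk, rfl⟩
  simp only [Function.comp_apply, zero_add]
  rw [show ((k : Int)) = ((k : Nat) : Int) from rfl]
  rw [PySem.List.pyGet?_natCast, PySem.List.pyGet?_natCast]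
  cases hq : ((courses.zip mentors).zip durations)[k]? <;> simp [hq]

-- ===== VERDICT (by name: the statement is the Claim_ definition above) =====
theorem get_lowest_course_spec : Claim_equal_get_lowest_course := by
  intro c m d _ _
  unfold Spec_get_lowest_course
  exact pv_ports_eq c m d
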